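-- pv_equiv track=rewrite | github.com/liao961120/senceBootstrap | bootstrap_sentences_from_corp.py | find_all_target_word_window
-- ===== SOURCE A (Python) =====
-- def find_all_target_word_window(target, text, l_window=15, r_window=15):
--     start = 0
--     match_idx = []
--     text_len = len(text)
--     while True:
--         start = text.find(target, start)
--         if start != -1:
--
--             # Get a window range containing target word
--             left_idx = 0 if (start - l_window) < 0 else (start - l_window)
--             right_idx = text_len if (start + len(target) + r_window > text_len) else (start + len(target) + r_window)
--             match_idx.append([left_idx, right_idx])
--
--             start = right_idx + 1 if (right_idx < text_len) else text_len
--         else: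
--             return(match_idx)
--     return(match_idx)
-- ===== SOURCE B (Python) =====
-- def find_all_target_word_window(target, text, l_window=15, r_window=15):
--     n = len(text)
--     m = len(target)
--     occs = [p for p in range(n - m + 1) if text[p:p+m] == target]
--     res = []
--     next_allowed = 0
--     for p in occs:
--         if p >= next_allowed:
--             left = 0 if p - l_window < 0 else p - l_window
--             right = n if p + m + r_window > n else p + m + r_window
--             res.append([left, right])
--             next_allowed = right + 1 if right < n else n
--     return res
-- ===== Notes on version B (the rewrite author's own statement) =====
-- stated objective: alternative
-- what changed: A repeatedly calls text.find in a while-loop that jumps past each window; B first materialises the full list of occurrence start positions by scanning every position once, then a separate greedy pass over that index with a next_allowed cursor selects the same windows.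
-- outside the precondition, e.g. on find_all_target_word_window('ab', 'abab', 0, -4): A returns [[0, -2]], B returns [[0, -2], [2, 0]]
import Mathlib
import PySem

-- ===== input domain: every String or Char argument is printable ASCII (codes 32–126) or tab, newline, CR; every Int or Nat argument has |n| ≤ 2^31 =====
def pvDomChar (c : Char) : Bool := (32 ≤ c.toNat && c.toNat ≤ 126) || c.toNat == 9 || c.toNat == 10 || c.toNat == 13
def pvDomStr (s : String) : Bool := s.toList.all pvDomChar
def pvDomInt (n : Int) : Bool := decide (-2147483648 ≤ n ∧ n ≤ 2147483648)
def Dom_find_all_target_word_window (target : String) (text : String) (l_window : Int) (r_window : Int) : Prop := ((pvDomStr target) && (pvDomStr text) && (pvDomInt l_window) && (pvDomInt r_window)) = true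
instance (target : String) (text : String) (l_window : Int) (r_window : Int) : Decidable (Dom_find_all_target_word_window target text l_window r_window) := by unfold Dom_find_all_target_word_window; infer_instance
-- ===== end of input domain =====

-- B replaces A's repeated text.find jumping loop by an index of all occurrence positions plus a
-- separate greedy cursor pass (objective: alternative decomposition, same cost).

-- ===== PORT A =====
-- the while-True loop of A; fuel only makes the recursion total (never exhausted inside Pre_)
def pvLoopA (target : String) (text : String) (l_window : Int) (r_window : Int)
    (text_len : Int) : Nat → Int → List (List Int) → List (List Int)
  | 0, _, match_idx => match_idx
  | fuel + 1, start0, match_idx =>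
    let start := PySem.Str.findFrom text target start0 none
    if start ≠ -1 then
      let left_idx := if start - l_window < 0 then 0 else start - l_window
      let right_idx := if start + PySem.Str.len target + r_window > text_len then text_len
                       else start + PySem.Str.len target + r_window
      pvLoopA target text l_window r_window text_len fuel
        (if right_idx < text_len then right_idx + 1 else text_len)
        (match_idx ++ [[left_idx, right_idx]])
    else match_idx

def find_all_target_word_window (target : String) (text : String) (l_window : Int) (r_window : Int) : List (List Int) :=
  pvLoopA target text l_window r_window (PySem.Str.len text) (text.toList.length + 2) 0 []

-- ===== PORT B =====
def find_all_target_word_window_alt (target : String) (text : String) (l_window : Int) (r_window : Int) : List (List Int) :=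
  let n : Int := PySem.Str.len text
  let m : Int := PySem.Str.len target
  let occs : List Int := (PySem.List.pyRange 0 (n - m + 1) 1).filter
      (fun p => PySem.List.slice text.toList (some p) (some (p + m)) == target.toList)
  (occs.foldl
    (fun (st : List (List Int) × Int) p =>
      if p ≥ st.2 then
        let left := if p - l_window < 0 then 0 else p - l_window
        let right := if p + m + r_window > n then n else p + m + r_window
        (st.1 ++ [[left, right]], if right < n then right + 1 else n)
      else st)
    ([], 0)).1

-- ===== PRECONDITION & SPEC =====
-- Pre_ excludes the empty target (A loops forever) and the case r_window < -len(target) with the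
-- target present in text, on which A either loops forever or terminates only through negative-start
-- find wraparound, an accident of its implementation.
def Pre_find_all_target_word_window (target : String) (text : String) (l_window : Int) (r_window : Int) : Prop :=
  target ≠ "" ∧ (0 ≤ r_window + PySem.Str.len target ∨ PySem.Str.isIn target text = false)
instance (target : String) (text : String) (l_window : Int) (r_window : Int) : Decidable (Pre_find_all_target_word_window target text l_window r_window) := by unfold Pre_find_all_target_word_window; infer_instance

def pvWitness_find_all_target_word_window : String × String × Int × Int := ("a", "abca", 1, 1)

def Spec_find_all_target_word_window (target : String) (text : String) (l_window : Int) (r_window : Int) (out : List (List Int)) : Prop := out = find_all_target_word_window_alt target text l_window r_window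
instance (target : String) (text : String) (l_window : Int) (r_window : Int) (out : List (List Int)) : Decidable (Spec_find_all_target_word_window target text l_window r_window out) := by unfold Spec_find_all_target_word_window; infer_instance

-- ===== CLAIM (what is proved, stated in full; the proofs are below) =====
def Claim_equal_find_all_target_word_window : Prop := ∀ (target : String) (text : String) (l_window : Int) (r_window : Int), Dom_find_all_target_word_window target text l_window r_window → Pre_find_all_target_word_window target text l_window r_window → Spec_find_all_target_word_window target text l_window r_window (find_all_target_word_window target text l_window r_window)

-- ===== LEMMAS AND PROOFS =====

-- common skeleton of both programs: greedy selection over a sorted occurrence list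
def pvGreedy (l_window r_window m n : Int) : List Int → Int → List (List Int)
  | [], _ => []
  | p :: ps, na =>
    if na ≤ p then
      (if p + m + r_window > n then n else p + m + r_window) |>
        (fun right => [if p - l_window < 0 then 0 else p - l_window, right] ::
          pvGreedy l_window r_window m n ps (if right < n then right + 1 else n))
    else pvGreedy l_window r_window m n ps na

theorem pvFold_eq_greedy (l_window r_window m n : Int) (ps : List Int)
    (acc : List (List Int)) (na : Int) :
    (ps.foldl
      (fun (st : List (List Int) × Int) p =>
        if p ≥ st.2 then
          ((st.1 ++ [[if p - l_window < 0 then 0 else p - l_window,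
             if p + m + r_window > n then n else p + m + r_window]]),
           if (if p + m + r_window > n then n else p + m + r_window) < n
           then (if p + m + r_window > n then n else p + m + r_window) + 1 else n)
        else st)
      (acc, na)).1 = acc ++ pvGreedy l_window r_window m n ps na := by
  induction ps generalizing acc na with
  | nil => simp [pvGreedy]
  | cons p ps ih =>
    simp only [List.foldl_cons, pvGreedy, ge_iff_le]
    by_cases h : na ≤ p
    · rw [if_pos h, if_pos h, ih]
      simp
    · rw [if_neg h, if_neg h]
      exact ih acc na

theorem pvFindFrom_neg (target text : String) (na : Int) (h0 : 0 ≤ na)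
    (hn : na.toNat ≤ text.toList.length)
    (hno : ∀ q : Nat, na.toNat ≤ q → ¬ target.toList <+: text.toList.drop q) :
    PySem.Str.findFrom text target na none = -1 := by
  have : na = ((na.toNat : Nat) : Int) := by omega
  rw [this, PySem.Str.findFrom_eq,
    PySem.Chars.findFrom_natCast_eq_neg_one_iff text.toList target.toList na.toNat hn]
  intro hinf
  have : ∃ j, target.toList <+: (text.toList.drop na.toNat).drop j := by
    rcases hinf with ⟨pre, suf, h⟩
    exact ⟨pre.length, by rw [← h]; simp⟩
  rcases this with ⟨j, hj⟩
  rw [List.drop_drop] at hj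
  exact hno (na.toNat + j) (by omega) hj

theorem pvFindFrom_pos (target text : String) (na p : Int) (h0 : 0 ≤ na) (hnp : na ≤ p)
    (hn : na.toNat ≤ text.toList.length)
    (hp : target.toList <+: text.toList.drop p.toNat)
    (hfirst : ∀ i : Nat, na.toNat ≤ i → i < p.toNat → ¬ target.toList <+: text.toList.drop i) :
    PySem.Str.findFrom text target na none = p := by
  have hcast : na = ((na.toNat : Nat) : Int) := by omega
  rw [hcast, PySem.Str.findFrom_eq,
    PySem.Chars.findFrom_natCast text.toList target.toList na.toNat hn]
  set k := na.toNat with hk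
  have hinf : target.toList <:+: (text.toList.drop k) := by
    have : target.toList <+: (text.toList.drop k).drop (p.toNat - k) := by
      rw [List.drop_drop]
      have : k + (p.toNat - k) = p.toNat := by omega
      rw [this]; exact hp
    exact this.isInfix.trans (List.drop_suffix _ _).isInfix
  have hfind : PySem.Chars.find (text.toList.drop k) target.toList ≠ -1 :=
    (PySem.Chars.find_ne_neg_one_iff _ _).mpr hinf
  have hge : 0 ≤ PySem.Chars.find (text.toList.drop k) target.toList := by
    rcases (PySem.Chars.find_nonneg_iff (text.toList.drop k) target.toList).mpr hinf with h
    exact h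
  rcases PySem.Chars.find_spec hge with ⟨hpre, hmin⟩
  set j := (PySem.Chars.find (text.toList.drop k) target.toList).toNat with hj
  rw [List.drop_drop] at hpre
  have hj_eq : j = p.toNat - k := by
    by_contra hne
    rcases Nat.lt_or_ge j (p.toNat - k) with hlt | hgt
    · exact hfirst (k + j) (by omega) (by omega) hpre
    · have : p.toNat - k < j := by omega
      have := hmin (p.toNat - k) this
      rw [List.drop_drop] at this
      have heq : k + (p.toNat - k) = p.toNat := by omega
      rw [heq] at this
      exact this hp
  rw [if_neg hfind]
  have : PySem.Chars.find (text.toList.drop k) target.toList = (j : Int) := by omega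
  rw [this, hj_eq]
  omega

-- main invariant: A's find loop computes the greedy selection over any faithful occurrence index
theorem pvLoopA_eq_greedy (target text : String) (l_window r_window : Int)
    (hne : target.toList ≠ []) (hr : 0 ≤ r_window + (target.toList.length : Int)) :
    ∀ (ps : List Int), ps.Pairwise (· < ·) →
    (∀ q ∈ ps, 0 ≤ q ∧ q + (target.toList.length : Int) ≤ (text.toList.length : Int) ∧
        target.toList <+: text.toList.drop q.toNat) →
    ∀ (fuel : Nat) (na : Int) (acc : List (List Int)),
    (∀ q : Int, 0 ≤ q → target.toList <+: text.toList.drop q.toNat →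
        q + (target.toList.length : Int) ≤ (text.toList.length : Int) → na ≤ q → q ∈ ps) →
    0 ≤ na → na ≤ (text.toList.length : Int) → ps.length < fuel →
    pvLoopA target text l_window r_window ((text.toList.length : Int)) fuel na acc =
      acc ++ pvGreedy l_window r_window (target.toList.length : Int) (text.toList.length : Int) ps na := by
  have hlen : PySem.Str.len target = (target.toList.length : Int) := by simp
  intro ps
  induction ps with
  | nil =>
    intro _ _ fuel na acc hcomplete hna0 hnan hfuel
    obtain ⟨f, rfl⟩ : ∃ f, fuel = f + 1 := ⟨fuel - 1, by omega⟩
    have hfind : PySem.Str.findFrom text target na none = -1 := by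
      apply pvFindFrom_neg _ _ _ hna0 (by omega)
      intro q hq hpre
      have hqlen : (q : Int) + target.toList.length ≤ text.toList.length := by
        have h1 := hpre.length_le
        rw [List.length_drop] at h1
        rcases Nat.lt_or_ge q text.toList.length with h | h
        · omega
        · exfalso
          have hdnil : text.toList.drop q = [] := by simp [List.drop_eq_nil_of_le h]
          rw [hdnil] at hpre
          exact hne (List.prefix_nil.mp hpre)
      have hmem := hcomplete (q : Int) (by omega) (by simpa using hpre) hqlen (by omega)
      simp at hmem
    simp only [pvLoopA, hfind]
    simp [pvGreedy]
  | cons p ps ih =>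
    intro hsort hocc fuel na acc hcomplete hna0 hnan hfuel
    obtain ⟨f, rfl⟩ : ∃ f, fuel = f + 1 := ⟨fuel - 1, by omega⟩
    obtain ⟨hp0, hpmn, hppre⟩ := hocc p List.mem_cons_self
    have hm1 : 0 < target.toList.length := List.length_pos_of_ne_nil hne
    by_cases hle : na ≤ p
    · -- the next find hits exactly p
      have hfind : PySem.Str.findFrom text target na none = p := by
        apply pvFindFrom_pos _ _ _ _ hna0 hle (by omega) hppre
        intro i h1 h2 hpre
        have hilen : (i : Int) + target.toList.length ≤ text.toList.length := by
          have h3 := hpre.length_le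
          rw [List.length_drop] at h3
          rcases Nat.lt_or_ge i text.toList.length with h | h
          · omega
          · exfalso
            have hdnil : text.toList.drop i = [] := by simp [List.drop_eq_nil_of_le h]
            rw [hdnil] at hpre
            exact hne (List.prefix_nil.mp hpre)
        have hmem := hcomplete (i : Int) (by omega) (by simpa using hpre) hilen (by omega)
        rcases List.mem_cons.mp hmem with heq | hmem'
        · omega
        · have := (List.pairwise_cons.mp hsort).1 _ hmem'
          omega
      simp only [pvLoopA, hfind, hlen]
      rw [if_pos (show p ≠ -1 by omega)]
      have hrw := ih (List.Pairwise.of_cons hsort) (fun q hq => hocc q (List.mem_cons_of_mem _ hq))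
      set m : Int := (target.toList.length : Int) with hm
      set n : Int := (text.toList.length : Int) with hn
      set right : Int := if p + m + r_window > n then n else p + m + r_window with hright
      set na' : Int := if right < n then right + 1 else n with hna'
      have hr_ge : right ≥ p ∨ right = n := by
        rw [hright]; split_ifs with h
        · right; rfl
        · left; omega
      have hna'_cases : (na' = n) ∨ (p + 1 ≤ na' ∧ na' ≤ n) := by
        rw [hna']; split_ifs with h
        · right
          constructor
          · rcases hr_ge with h1 | h1
            · omega
            · omega
          · omega
        · left; rfl
      rw [hrw f na' (acc ++ [[if p - l_window < 0 then 0 else p - l_window, right]]) ?_ ?_ ?_ ?_]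
      · simp only [pvGreedy]
        rw [if_pos hle, ← hright, ← hna']
        simp [List.append_assoc]
      · -- completeness for the tail
        intro q hq0 hqpre hqlen hqna
        have hqn : q < n := by omega
        have hna'p : p + 1 ≤ na' := by
          rcases hna'_cases with h | h
          · omega
          · omega
        have hmem := hcomplete q hq0 hqpre hqlen (by omega)
        rcases List.mem_cons.mp hmem with heq | hmem'
        · omega
        · exact hmem'
      · rcases hna'_cases with h | h
        · omega
        · omega
      · rcases hna'_cases with h | h
        · omega
        · omega
      · simpa using Nat.lt_of_succ_lt_succ hfuel
    · -- head already inside the last window: A never sees it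
      simp only [pvGreedy]
      rw [if_neg hle]
      exact ih (List.Pairwise.of_cons hsort) (fun q hq => hocc q (List.mem_cons_of_mem _ hq))
        (f + 1) na acc
        (fun q hq0 hqpre hqlen hqna => by
          have hmem := hcomplete q hq0 hqpre hqlen hqna
          rcases List.mem_cons.mp hmem with heq | hmem'
          · omega
          · exact hmem')
        hna0 hnan (by simpa using Nat.lt_of_succ_lt_succ (Nat.lt_succ_of_lt hfuel))

theorem pvOccs_mem (target text : String) (q : Int)
    (hq : q ∈ (PySem.List.pyRange 0 ((text.toList.length : Int) - (target.toList.length : Int) + 1) 1).filter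
      (fun p => PySem.List.slice text.toList (some p) (some (p + (target.toList.length : Int))) == target.toList)) :
    0 ≤ q ∧ q + (target.toList.length : Int) ≤ (text.toList.length : Int) ∧
      target.toList <+: text.toList.drop q.toNat := by
  rw [List.mem_filter] at hq
  obtain ⟨hr1, hr2⟩ := hq
  rw [PySem.List.mem_pyRange_one] at hr1
  refine ⟨hr1.1, by omega, ?_⟩
  rw [beq_iff_eq] at hr2
  rw [PySem.List.slice_toNat text.toList hr1.1 (by omega)] at hr2
  have htn : (q + (target.toList.length : Int)).toNat - q.toNat = target.toList.length := by omega
  rw [htn] at hr2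
  rw [List.prefix_iff_eq_take]
  exact hr2.symm

theorem pvOccs_complete (target text : String) (q : Int) (h0 : 0 ≤ q)
    (hpre : target.toList <+: text.toList.drop q.toNat)
    (hlen : q + (target.toList.length : Int) ≤ (text.toList.length : Int)) :
    q ∈ (PySem.List.pyRange 0 ((text.toList.length : Int) - (target.toList.length : Int) + 1) 1).filter
      (fun p => PySem.List.slice text.toList (some p) (some (p + (target.toList.length : Int))) == target.toList) := by
  rw [List.mem_filter]
  constructor
  · rw [PySem.List.mem_pyRange_one]; exact ⟨h0, by omega⟩
  · simp only [beq_iff_eq]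
    rw [PySem.List.slice_toNat text.toList h0 (by omega)]
    have htn : (q + (target.toList.length : Int)).toNat - q.toNat = target.toList.length := by omega
    rw [htn]
    exact (List.prefix_iff_eq_take.mp hpre).symm

-- ===== VERDICT (by name: the statement is the Claim_ definition above) =====
theorem find_all_target_word_window_spec : Claim_equal_find_all_target_word_window := by
  intro target text l_window r_window _ hpre
  obtain ⟨hts, hcase⟩ := hpre
  have hne : target.toList ≠ [] := by simpa using hts
  have hm1 : 0 < target.toList.length := List.length_pos_of_ne_nil hne
  unfold Spec_find_all_target_word_window
  set occs : List Int := (PySem.List.pyRange 0 ((text.toList.length : Int) - (target.toList.length : Int) + 1) 1).filter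
      (fun p => PySem.List.slice text.toList (some p) (some (p + (target.toList.length : Int))) == target.toList) with hoccs
  have hB : find_all_target_word_window_alt target text l_window r_window
      = pvGreedy l_window r_window (target.toList.length : Int) (text.toList.length : Int) occs 0 := by
    have h := pvFold_eq_greedy l_window r_window (target.toList.length : Int) (text.toList.length : Int) occs [] 0
    simpa [find_all_target_word_window_alt, PySem.Str.len_eq, ← String.length_toList, ← hoccs] using h
  have hsort : occs.Pairwise (· < ·) :=
    List.Pairwise.filter _ (PySem.List.pairwise_lt_pyRange_one _ _)
  have hflen : occs.length < text.toList.length + 2 := by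
    have h1 : occs.length ≤ ((text.toList.length : Int) - (target.toList.length : Int) + 1 - 0).toNat := by
      rw [hoccs]
      have := List.length_filter_le
        (fun p => PySem.List.slice text.toList (some p) (some (p + (target.toList.length : Int))) == target.toList)
        (PySem.List.pyRange 0 ((text.toList.length : Int) - (target.toList.length : Int) + 1) 1)
      rwa [PySem.List.length_pyRange_one] at this
    omega
  rw [find_all_target_word_window,
    show PySem.Str.len text = (text.toList.length : Int) by simp]
  rcases hcase with hrw | hnin
  · have hr' : 0 ≤ r_window + (target.toList.length : Int) := by
      simpa using hrw
    rw [pvLoopA_eq_greedy target text l_window r_window hne hr' occs hsort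
      (fun q hq => pvOccs_mem target text q (hoccs ▸ hq))
      (text.toList.length + 2) 0 []
      (fun q h0 hp hl _ => hoccs ▸ pvOccs_complete target text q h0 hp hl)
      le_rfl (by omega) hflen]
    rw [hB]
    simp
  · have hnopre : ∀ q : Nat, ¬ target.toList <+: text.toList.drop q := by
      intro q hq
      have hinf : target.toList <:+: text.toList :=
        hq.isInfix.trans (List.drop_suffix q text.toList).isInfix
      have := (PySem.Str.isIn_iff_infix target text).mpr hinf
      rw [hnin] at this
      cases this
    have hoccs_nil : occs = [] := by
      rw [List.eq_nil_iff_forall_not_mem]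
      intro q hq
      exact hnopre q.toNat (pvOccs_mem target text q (hoccs ▸ hq)).2.2
    have hfind := pvFindFrom_neg target text 0 le_rfl (by simp) (fun q _ => hnopre q)
    show pvLoopA target text l_window r_window ((text.toList.length : Int)) ((text.toList.length + 1) + 1) 0 [] = _
    simp only [pvLoopA, hfind]
    rw [hB, hoccs_nil]
    simp [pvGreedy]
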